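-- pv_equiv track=rewrite | github.com/Roibos22/AoC25 | day_06/day_06.py | part_one
-- ===== SOURCE A (Python) =====
-- def do_calc(line, op):
--     res = 0
--     if op == '+':
--         res += sum(line)
--     elif op == '*':
--         product = 1
--         for num in line:
--             product *= num
--         res += product
--     return res
--
-- def part_one(data):
--     res = 0
--     data = list(line.split() for line in data)
--     data = list(zip(*data))
--     for line in data:
--         op = line[-1]
--         line = list(map(int, line[:-1]))
--         res += do_calc(line, op)
--     return res
-- ===== SOURCE B (Python) =====
-- def part_one(data):
--     rows = [line.split() for line in data]
--     if not rows:
--         return 0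
--     width = min(len(r) for r in rows)
--     sums = [0] * width
--     prods = [1] * width
--     for r in rows[:-1]:
--         vals = [int(r[j]) for j in range(width)]
--         sums = [s + v for s, v in zip(sums, vals)]
--         prods = [p * v for p, v in zip(prods, vals)]
--     total = 0
--     for op, s, p in zip(rows[-1], sums, prods):
--         if op == '+':
--             total += s
--         elif op == '*':
--             total += p
--     return total
-- ===== Notes on version B (the rewrite author's own statement) =====
-- stated objective: alternative
-- what changed: B removes the transpose entirely: one row-major pass over the numeric rows maintains per-column running sum and product accumulators, then the operator row selects sum or product per column.
import Mathlib
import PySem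

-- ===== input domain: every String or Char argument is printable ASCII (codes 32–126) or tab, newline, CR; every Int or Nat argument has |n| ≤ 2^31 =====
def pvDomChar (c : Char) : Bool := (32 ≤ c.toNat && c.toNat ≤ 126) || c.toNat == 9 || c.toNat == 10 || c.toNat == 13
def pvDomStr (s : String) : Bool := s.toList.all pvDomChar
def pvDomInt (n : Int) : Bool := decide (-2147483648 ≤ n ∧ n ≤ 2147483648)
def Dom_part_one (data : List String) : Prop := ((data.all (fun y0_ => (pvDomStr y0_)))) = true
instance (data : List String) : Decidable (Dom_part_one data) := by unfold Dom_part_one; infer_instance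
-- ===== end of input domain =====

-- B removes A's transpose: one row-major pass with per-column sum/product accumulators (objective: alternative).

-- ===== PORT A =====
-- min row length (zip(*rows) truncates to the shortest row)
def minW (rows : List (List String)) : Nat :=
  match rows with
  | [] => 0
  | r :: rs => rs.foldl (fun m r' => min m r'.length) r.length

-- exact model of zip(*rows): minW columns, each column reads every row; indices < minW are in range, so the getD default is never used
def pyZipT (rows : List (List String)) : List (List String) :=
  match rows with
  | [] => []
  | _ => (List.range (minW rows)).map (fun i => rows.map (fun r => r.getD i ""))

def do_calc (line : List Int) (op : String) : Int :=
  let res : Int := 0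
  if op = "+" then res + line.sum
  else if op = "*" then res + line.foldl (fun p num => p * num) 1
  else res

def part_one (data : List String) : Int :=
  let rows := data.map (fun line => PySem.Str.split₀ line)
  let cols := pyZipT rows
  cols.foldl (fun res col =>
    -- op = line[-1]: every column is as long as rows, nonempty here, so getD "" is never used
    let op := (PySem.List.pyGet? col (-1)).getD ""
    -- line = list(map(int, line[:-1])); int() raising ValueError is excluded by Pre_, so getD 0 is never used
    let line := (PySem.List.slice col none (some (-1))).map (fun t => (PySem.Int.ofStr? t).getD 0)
    res + do_calc line op) 0

-- ===== PORT B =====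
def part_one_alt (data : List String) : Int :=
  let rows := data.map (fun line => PySem.Str.split₀ line)
  match rows with
  | [] => 0
  | r0 :: rest =>
    let width := minW (r0 :: rest)
    let sp := (r0 :: rest).dropLast.foldl
      (fun (acc : List Int × List Int) r =>
        let vals := (List.range width).map (fun j => (PySem.Int.ofStr? (r.getD j "")).getD 0)
        ((acc.1.zip vals).map (fun sv => sv.1 + sv.2),
         (acc.2.zip vals).map (fun pv => pv.1 * pv.2)))
      (List.replicate width (0 : Int), List.replicate width (1 : Int))
    let ops := (r0 :: rest).getLast (by simp)
    (ops.zip (sp.1.zip sp.2)).foldl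
      (fun total x =>
        if x.1 = "+" then total + x.2.1
        else if x.1 = "*" then total + x.2.2
        else total) 0

-- ===== PRECONDITION & SPEC =====
-- Pre_ excludes exactly the inputs where Python A raises ValueError: a token in a
-- numeric row (all rows but the last), at a column index below the zip width,
-- that int() cannot parse.
def Pre_part_one (data : List String) : Prop :=
  (let rows := data.map (fun line => PySem.Str.split₀ line)
   rows.dropLast.all (fun r =>
     (List.range (minW rows)).all (fun j => (PySem.Int.ofStr? (r.getD j "")).isSome))) = true
instance (data : List String) : Decidable (Pre_part_one data) := by unfold Pre_part_one; infer_instance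

def pvWitness_part_one : List String := ["1 2 3", "4 5 6", "+ * +"]

def Spec_part_one (data : List String) (out : Int) : Prop := out = part_one_alt data
instance (data : List String) (out : Int) : Decidable (Spec_part_one data out) := by unfold Spec_part_one; infer_instance

-- ===== CLAIM (what is proved, stated in full; the proofs are below) =====
def Claim_equal_part_one : Prop := ∀ (data : List String), Dom_part_one data → Pre_part_one data → Spec_part_one data (part_one data)

-- ===== LEMMAS AND PROOFS =====

def pvVal (r : List String) (j : Nat) : Int := (PySem.Int.ofStr? (r.getD j "")).getD 0
def pvColSum (num : List (List String)) (j : Nat) : Int := (num.map (fun r => pvVal r j)).sum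
def pvColProd (num : List (List String)) (j : Nat) : Int := (num.map (fun r => pvVal r j)).prod
def pvPick (ops : List String) (num : List (List String)) (j : Nat) : Int :=
  if ops.getD j "" = "+" then pvColSum num j
  else if ops.getD j "" = "*" then pvColProd num j else 0

theorem foldl_min_le (rs : List (List String)) (a : Nat) :
    (rs.foldl (fun m r' => min m r'.length) a ≤ a) ∧
    (∀ r ∈ rs, rs.foldl (fun m r' => min m r'.length) a ≤ r.length) := by
  induction rs generalizing a with
  | nil => simp
  | cons r rs ih =>
    refine ⟨le_trans (ih (min a r.length)).1 (by omega), ?_⟩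
    intro r' hr'
    rcases List.mem_cons.mp hr' with h | h
    · subst h; exact le_trans (ih (min a r'.length)).1 (by omega)
    · exact (ih (min a r.length)).2 _ h

theorem minW_le (rows : List (List String)) (r : List String) (hr : r ∈ rows) :
    minW rows ≤ r.length := by
  cases rows with
  | nil => cases hr
  | cons r0 rs =>
    rcases List.mem_cons.mp hr with h | h
    · subst h; exact (foldl_min_le rs r.length).1
    · exact (foldl_min_le rs r0.length).2 _ h

theorem foldl_add_int (l : List α) (f : α → Int) (a : Int) :
    l.foldl (fun s x => s + f x) a = a + (l.map f).sum := by
  induction l generalizing a with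
  | nil => simp
  | cons x l ih => simp [ih]; ring

-- left-zip with a map over range, when the left list is long enough
theorem zip_map_range (l : List α) (d : α) (h : Nat → β) (w : Nat) (hw : w ≤ l.length) :
    l.zip ((List.range w).map h) = (List.range w).map (fun j => (l.getD j d, h j)) := by
  apply List.ext_getElem
  · simp; omega
  · intro j h1 h2
    simp only [List.length_zip, List.length_map, List.length_range] at h1
    simp [List.getD_eq_getElem?_getD, List.getElem?_eq_getElem (show j < l.length by omega)]

-- B's accumulator invariant
theorem B_fold (num : List (List String)) (w : Nat) (f g : Nat → Int) :
    num.foldl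
      (fun (acc : List Int × List Int) r =>
        ((acc.1.zip ((List.range w).map (fun j => (PySem.Int.ofStr? (r.getD j "")).getD 0))).map (fun sv => sv.1 + sv.2),
         (acc.2.zip ((List.range w).map (fun j => (PySem.Int.ofStr? (r.getD j "")).getD 0))).map (fun pv => pv.1 * pv.2)))
      ((List.range w).map f, (List.range w).map g)
    = ((List.range w).map (fun j => f j + pvColSum num j),
       (List.range w).map (fun j => g j * pvColProd num j)) := by
  induction num generalizing f g with
  | nil => simp [pvColSum, pvColProd]
  | cons r num ih =>
    have hz : ∀ (f : Nat → Int),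
        ((List.range w).map f).zip ((List.range w).map (fun j => (PySem.Int.ofStr? (r.getD j "")).getD 0))
        = (List.range w).map (fun j => (f j, pvVal r j)) := by
      intro f; rw [List.zip_map']; rfl
    simp only [List.foldl_cons, hz, List.map_map, Function.comp_def]
    rw [ih (fun j => f j + pvVal r j) (fun j => g j * pvVal r j)]
    simp only [Prod.mk.injEq]
    constructor
    · apply List.map_congr_left; intro j hj; simp [pvColSum]; ring
    · apply List.map_congr_left; intro j hj; simp [pvColProd]; ring

theorem foldl_pick_sum (ops : List String) (num : List (List String)) (l : List Nat) (a : Int) :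
    l.foldl (fun t j =>
      if ops.getD j "" = "+" then t + (0 + pvColSum num j)
      else if ops.getD j "" = "*" then t + (1 * pvColProd num j) else t) a
    = a + (l.map (pvPick ops num)).sum := by
  induction l generalizing a with
  | nil => simp
  | cons j l ih =>
    simp only [List.foldl_cons, ih, List.map_cons, List.sum_cons, pvPick]
    split_ifs <;> ring

theorem B_char (data : List String) (r0 : List String) (rest : List (List String))
    (h : data.map (fun line => PySem.Str.split₀ line) = r0 :: rest) :
    part_one_alt data
    = ((List.range (minW (r0 :: rest))).map
        (pvPick ((r0 :: rest).getLast (by simp)) ((r0 :: rest).dropLast))).sum := by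
  have hops : minW (r0 :: rest) ≤ ((r0 :: rest).getLast (by simp)).length :=
    minW_le _ _ (List.getLast_mem _)
  simp only [part_one_alt, h]
  have h0 : List.replicate (minW (r0 :: rest)) (0 : Int)
      = (List.range (minW (r0 :: rest))).map (fun _ => (0 : Int)) := by simp
  have h1 : List.replicate (minW (r0 :: rest)) (1 : Int)
      = (List.range (minW (r0 :: rest))).map (fun _ => (1 : Int)) := by simp
  rw [h0, h1, B_fold, List.zip_map',
      zip_map_range _ "" _ _ hops, List.foldl_map, foldl_pick_sum]
  simp

theorem A_char (data : List String) (r0 : List String) (rest : List (List String))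
    (h : data.map (fun line => PySem.Str.split₀ line) = r0 :: rest) :
    part_one data
    = ((List.range (minW (r0 :: rest))).map
        (pvPick ((r0 :: rest).getLast (by simp)) ((r0 :: rest).dropLast))).sum := by
  simp only [part_one, h, pyZipT]
  rw [List.foldl_map, foldl_add_int]
  simp only [zero_add]
  congr 1
  apply List.map_congr_left
  intro j hj
  rw [PySem.List.slice_to_neg_one, PySem.List.pyGet?_neg_one, List.getLast?_map,
      List.getLast?_eq_some_getLast (by simp : (r0 :: rest) ≠ []), ← List.map_dropLast, List.map_map]
  simp only [Option.map_some, Option.getD_some]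
  simp only [do_calc, pvPick, pvColSum, pvColProd, pvVal, List.prod_eq_foldl, zero_add]
  rfl

theorem part_one_witness_ok : Dom_part_one pvWitness_part_one ∧ Pre_part_one pvWitness_part_one := by
  constructor <;> decide

-- ===== VERDICT (by name: the statement is the Claim_ definition above) =====
theorem part_one_spec : Claim_equal_part_one := by
  intro data _ _
  unfold Spec_part_one
  cases h : data.map (fun line => PySem.Str.split₀ line) with
  | nil => simp [part_one, part_one_alt, h, pyZipT]
  | cons r0 rest => rw [A_char data r0 rest h, B_char data r0 rest h]
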